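-- pv_equiv track=rewrite | github.com/n7tms/AOC | AOC2019/01.py | part2
-- ===== SOURCE A (Python) =====
-- def part2(data):    # 4882337
--     total_fuel = 0
--
--     for x in data:
--         f = (x // 3) - 2
--         while f>0:
--             total_fuel += f
--             f = (f // 3) - 2
--
--     return total_fuel
-- ===== SOURCE B (Python) =====
-- def fuel(m):
--     f = m // 3 - 2
--     if f <= 0:
--         return 0
--     return f + fuel(f)
--
-- def part2(data):
--     return sum(fuel(x) for x in data)
-- ===== Notes on version B (the rewrite author's own statement) =====
-- stated objective: idiomatic
-- what changed: Replaces the flat loop with a shared while-accumulator by a recursive helper fuel(m) summing the fuel chain per module, combined with sum() over a generator.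
import Mathlib
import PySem

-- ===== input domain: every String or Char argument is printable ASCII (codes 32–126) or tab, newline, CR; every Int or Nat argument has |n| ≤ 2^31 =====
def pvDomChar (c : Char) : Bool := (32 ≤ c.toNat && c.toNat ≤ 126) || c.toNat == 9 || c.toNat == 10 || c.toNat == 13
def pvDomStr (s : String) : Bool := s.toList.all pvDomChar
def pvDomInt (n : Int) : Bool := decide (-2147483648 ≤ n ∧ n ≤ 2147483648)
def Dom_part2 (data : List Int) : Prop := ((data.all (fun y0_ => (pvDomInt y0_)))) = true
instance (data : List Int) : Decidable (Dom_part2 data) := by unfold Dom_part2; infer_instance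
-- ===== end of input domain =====

-- B: recursive per-module fuel helper + sum, replacing A's flat loop with a shared while-accumulator; same values.
-- ===== PORT A =====
-- inner while-loop of A: while f>0: total_fuel += f; f = f//3 - 2
def part2Loop (f : Int) (acc : Int) : Int :=
  if h : f > 0 then part2Loop (PySem.Int.floordiv f 3 - 2) (acc + f) else acc
termination_by f.toNat
decreasing_by
  have : PySem.Int.floordiv f 3 = f / 3 := PySem.Int.floordiv_eq_ediv_of_pos (by omega)
  omega

def part2 (data : List Int) : Int :=
  data.foldl (fun total_fuel x => part2Loop (PySem.Int.floordiv x 3 - 2) total_fuel) 0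

-- ===== PORT B =====
def fuel (m : Int) : Int :=
  let f := PySem.Int.floordiv m 3 - 2
  if h : f ≤ 0 then 0 else f + fuel f
termination_by m.toNat
decreasing_by
  have : PySem.Int.floordiv m 3 = m / 3 := PySem.Int.floordiv_eq_ediv_of_pos (by omega)
  simp only [f] at h ⊢
  omega

def part2_alt (data : List Int) : Int :=
  (data.map fuel).sum

-- ===== PRECONDITION & SPEC =====
def Spec_part2 (data : List Int) (out : Int) : Prop := out = part2_alt data
instance (data : List Int) (out : Int) : Decidable (Spec_part2 data out) := by unfold Spec_part2; infer_instance

-- ===== CLAIM (what is proved, stated in full; the proofs are below) =====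
def Claim_equal_part2 : Prop := ∀ (data : List Int), Dom_part2 data → Spec_part2 data (part2 data)

-- ===== LEMMAS AND PROOFS =====

-- ===== VERDICT (by name: the statement is the Claim_ definition above) =====
theorem loop_eq_fuel (m : Int) : ∀ acc, part2Loop (PySem.Int.floordiv m 3 - 2) acc = acc + fuel m := by
  induction m using fuel.induct with
  | case1 m f hle =>
    intro acc
    rw [part2Loop, fuel]
    rw [dif_neg (not_lt.mpr hle), dif_pos hle]
    ring
  | case2 m f hle ih =>
    intro acc
    rw [part2Loop, fuel]
    rw [dif_pos (lt_of_not_ge hle), dif_neg hle]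
    rw [show part2Loop (PySem.Int.floordiv (PySem.Int.floordiv m 3 - 2) 3 - 2)
          (acc + (PySem.Int.floordiv m 3 - 2))
        = (acc + (PySem.Int.floordiv m 3 - 2)) + fuel (PySem.Int.floordiv m 3 - 2) from ih _]
    ring

theorem foldl_eq_sum (data : List Int) : ∀ acc,
    data.foldl (fun total_fuel x => part2Loop (PySem.Int.floordiv x 3 - 2) total_fuel) acc
      = acc + (data.map fuel).sum := by
  induction data with
  | nil => simp
  | cons x xs ih =>
    intro acc
    rw [List.foldl_cons, loop_eq_fuel, ih]
    simp only [List.map_cons, List.sum_cons]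
    ring

theorem part2_spec : Claim_equal_part2 := by
  intro data _
  unfold Spec_part2 part2 part2_alt
  simpa using foldl_eq_sum data 0
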